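-- pv_equiv track=rewrite | github.com/Pikurrot/RAG-DocVQA | src/_modules.py | compact_chunks
-- ===== SOURCE A (Python) =====
-- def compact_chunks(
-- 		words_text_chunks: list, # (bs, n_chunks, n_words)
-- 		words_boxes_chunks: list # (bs, n_chunks, n_words, 4)
-- ) -> tuple:
-- 	"""
-- 	Converts words and word boxes to compact chunks
-- 		:param words_text_chunks: list of words
-- 		:param words_boxes_chunks: list of boxes
-- 	"""
-- 	text_chunks = [] # (bs, n_chunks)
-- 	boxes_chunks = [] # (bs, n_chunks, 4)
--
-- 	for b, (batch_words_text_chunks, batch_words_box_chunks) in enumerate(zip(words_text_chunks, words_boxes_chunks)):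
-- 		batch_text_chunks = []
-- 		batch_box_chunks = []
-- 		for chunk_words, chunk_boxes in zip(batch_words_text_chunks, batch_words_box_chunks):
-- 			batch_text_chunks.append(" ".join(chunk_words))
-- 			# Find box of the chunk
-- 			try:
-- 				min_x = min([box[0] for box in chunk_boxes])
-- 				min_y = min([box[1] for box in chunk_boxes])
-- 				max_x = max([box[2] for box in chunk_boxes])
-- 				max_y = max([box[3] for box in chunk_boxes])
-- 			except ValueError:
-- 				min_x, min_y, max_x, max_y = 0, 0, 1, 1
-- 			batch_box_chunks.append([min_x, min_y, max_x, max_y])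
-- 		text_chunks.append(batch_text_chunks)
-- 		boxes_chunks.append(batch_box_chunks)
--
-- 	return text_chunks, boxes_chunks
-- ===== SOURCE B (Python) =====
-- def _chunk_box(chunk_boxes):
--     if not chunk_boxes:
--         return [0, 0, 1, 1]
--     first = chunk_boxes[0]
--     min_x, min_y, max_x, max_y = first[0], first[1], first[2], first[3]
--     for box in chunk_boxes[1:]:
--         if box[0] < min_x:
--             min_x = box[0]
--         if box[1] < min_y:
--             min_y = box[1]
--         if box[2] > max_x:
--             max_x = box[2]
--         if box[3] > max_y:
--             max_y = box[3]
--     return [min_x, min_y, max_x, max_y]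
--
--
-- def compact_chunks(words_text_chunks, words_boxes_chunks):
--     pairs = list(zip(words_text_chunks, words_boxes_chunks))
--     text_chunks = [[" ".join(cw) for cw, _ in zip(bw, bb)] for bw, bb in pairs]
--     boxes_chunks = [[_chunk_box(cb) for _, cb in zip(bw, bb)] for bw, bb in pairs]
--     return text_chunks, boxes_chunks
-- ===== Notes on version B (the rewrite author's own statement) =====
-- stated objective: alternative
-- what changed: Replaces the accumulating nested loops and four separate min/max comprehensions per chunk by two nested list comprehensions plus a single-pass helper that maintains all four running extremes in one traversal of the chunk's boxes.
import Mathlib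
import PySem

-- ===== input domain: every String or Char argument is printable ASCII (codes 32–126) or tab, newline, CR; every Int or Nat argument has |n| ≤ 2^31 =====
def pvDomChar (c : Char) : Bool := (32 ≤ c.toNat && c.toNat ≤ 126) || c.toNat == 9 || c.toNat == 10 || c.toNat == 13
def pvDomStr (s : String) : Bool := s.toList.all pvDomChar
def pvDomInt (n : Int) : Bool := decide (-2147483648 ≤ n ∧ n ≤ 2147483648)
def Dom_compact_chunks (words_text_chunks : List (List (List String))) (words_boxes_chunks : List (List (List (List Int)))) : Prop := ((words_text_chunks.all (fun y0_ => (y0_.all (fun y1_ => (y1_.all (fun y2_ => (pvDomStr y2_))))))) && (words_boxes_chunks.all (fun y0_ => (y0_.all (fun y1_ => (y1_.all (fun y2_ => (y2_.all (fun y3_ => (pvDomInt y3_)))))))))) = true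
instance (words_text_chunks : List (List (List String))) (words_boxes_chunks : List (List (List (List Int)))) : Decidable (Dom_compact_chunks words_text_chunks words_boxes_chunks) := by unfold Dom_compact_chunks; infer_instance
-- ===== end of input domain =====

-- B replaces A's accumulating loops with nested list comprehensions and computes each
-- chunk box in one pass with running extremes instead of four min/max scans (alternative).

-- ===== PORT A =====
-- the try: four min/max comprehensions; ValueError (empty chunk) → default box
def chunkBoxA (chunk_boxes : List (List Int)) : List Int :=
  match PySem.List.min? (chunk_boxes.map (fun box => PySem.List.pyGetD box 0 0)) (fun y => y),
        PySem.List.min? (chunk_boxes.map (fun box => PySem.List.pyGetD box 1 0)) (fun y => y),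
        PySem.List.max? (chunk_boxes.map (fun box => PySem.List.pyGetD box 2 0)) (fun y => y),
        PySem.List.max? (chunk_boxes.map (fun box => PySem.List.pyGetD box 3 0)) (fun y => y) with
  | some mnx, some mny, some mxx, some mxy => [mnx, mny, mxx, mxy]
  | _, _, _, _ => [0, 0, 1, 1]

def compact_chunks (words_text_chunks : List (List (List String))) (words_boxes_chunks : List (List (List (List Int)))) : List (List String) × List (List (List Int)) :=
  (words_text_chunks.zip words_boxes_chunks).foldl
    (fun (acc : List (List String) × List (List (List Int))) p =>
      let inner := (p.1.zip p.2).foldl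
        (fun (bacc : List String × List (List Int)) q =>
          (bacc.1 ++ [PySem.Str.join " " q.1], bacc.2 ++ [chunkBoxA q.2]))
        ([], [])
      (acc.1 ++ [inner.1], acc.2 ++ [inner.2]))
    ([], [])

-- ===== PORT B =====
-- _chunk_box: one pass over the boxes maintaining the four running extremes
def chunkBoxB (chunk_boxes : List (List Int)) : List Int :=
  match chunk_boxes with
  | [] => [0, 0, 1, 1]
  | first :: rest =>
    let m := rest.foldl
      (fun (m : Int × Int × Int × Int) box =>
        (if PySem.List.pyGetD box 0 0 < m.1 then PySem.List.pyGetD box 0 0 else m.1,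
         if PySem.List.pyGetD box 1 0 < m.2.1 then PySem.List.pyGetD box 1 0 else m.2.1,
         if PySem.List.pyGetD box 2 0 > m.2.2.1 then PySem.List.pyGetD box 2 0 else m.2.2.1,
         if PySem.List.pyGetD box 3 0 > m.2.2.2 then PySem.List.pyGetD box 3 0 else m.2.2.2))
      (PySem.List.pyGetD first 0 0, PySem.List.pyGetD first 1 0,
       PySem.List.pyGetD first 2 0, PySem.List.pyGetD first 3 0)
    [m.1, m.2.1, m.2.2.1, m.2.2.2]

def compact_chunks_alt (words_text_chunks : List (List (List String))) (words_boxes_chunks : List (List (List (List Int)))) : List (List String) × List (List (List Int)) :=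
  let pairs := words_text_chunks.zip words_boxes_chunks
  (pairs.map (fun p => (p.1.zip p.2).map (fun q => PySem.Str.join " " q.1)),
   pairs.map (fun p => (p.1.zip p.2).map (fun q => chunkBoxB q.2)))

-- ===== PRECONDITION & SPEC =====
-- Pre_ excludes exactly the inputs on which Python A raises an uncaught IndexError:
-- a box with fewer than 4 entries inside a (zip-visited) chunk; A returns everywhere else.
def Pre_compact_chunks (words_text_chunks : List (List (List String))) (words_boxes_chunks : List (List (List (List Int)))) : Prop :=
  ∀ p ∈ words_text_chunks.zip words_boxes_chunks, ∀ q ∈ p.1.zip p.2, ∀ b ∈ q.2, 4 ≤ b.length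
instance (words_text_chunks : List (List (List String))) (words_boxes_chunks : List (List (List (List Int)))) : Decidable (Pre_compact_chunks words_text_chunks words_boxes_chunks) := by unfold Pre_compact_chunks; infer_instance

def pvWitness_compact_chunks : List (List (List String)) × List (List (List (List Int))) :=
  ([[["a", "b"], []]], [[[[1, 2, 3, 4], [0, 1, 5, 6]], []]])

def Spec_compact_chunks (words_text_chunks : List (List (List String))) (words_boxes_chunks : List (List (List (List Int)))) (out : List (List String) × List (List (List Int))) : Prop := out = compact_chunks_alt words_text_chunks words_boxes_chunks
instance (words_text_chunks : List (List (List String))) (words_boxes_chunks : List (List (List (List Int)))) (out : List (List String) × List (List (List Int))) : Decidable (Spec_compact_chunks words_text_chunks words_boxes_chunks out) := by unfold Spec_compact_chunks; infer_instance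

-- ===== CLAIM (what is proved, stated in full; the proofs are below) =====
def Claim_equal_compact_chunks : Prop := ∀ (words_text_chunks : List (List (List String))) (words_boxes_chunks : List (List (List (List Int)))), Dom_compact_chunks words_text_chunks words_boxes_chunks → Pre_compact_chunks words_text_chunks words_boxes_chunks → Spec_compact_chunks words_text_chunks words_boxes_chunks (compact_chunks words_text_chunks words_boxes_chunks)

-- ===== LEMMAS AND PROOFS =====
-- the fold of B's tuple step computes the four componentwise folds
theorem tupleFold_eq (rest : List (List Int)) (a b c d : Int) :
    rest.foldl
      (fun (m : Int × Int × Int × Int) box =>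
        (min m.1 (PySem.List.pyGetD box 0 0), min m.2.1 (PySem.List.pyGetD box 1 0),
         max m.2.2.1 (PySem.List.pyGetD box 2 0), max m.2.2.2 (PySem.List.pyGetD box 3 0)))
      (a, b, c, d)
    = ((rest.map (fun box => PySem.List.pyGetD box 0 0)).foldl min a,
       (rest.map (fun box => PySem.List.pyGetD box 1 0)).foldl min b,
       (rest.map (fun box => PySem.List.pyGetD box 2 0)).foldl max c,
       (rest.map (fun box => PySem.List.pyGetD box 3 0)).foldl max d) := by
  induction rest generalizing a b c d with
  | nil => simp
  | cons x t ih => simp only [List.foldl_cons, List.map_cons, ih]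

-- B's branch-form step is the min/max step
theorem stepB_eq :
    (fun (m : Int × Int × Int × Int) (box : List Int) =>
        (if PySem.List.pyGetD box 0 0 < m.1 then PySem.List.pyGetD box 0 0 else m.1,
         if PySem.List.pyGetD box 1 0 < m.2.1 then PySem.List.pyGetD box 1 0 else m.2.1,
         if PySem.List.pyGetD box 2 0 > m.2.2.1 then PySem.List.pyGetD box 2 0 else m.2.2.1,
         if PySem.List.pyGetD box 3 0 > m.2.2.2 then PySem.List.pyGetD box 3 0 else m.2.2.2))
    = (fun (m : Int × Int × Int × Int) box =>
        (min m.1 (PySem.List.pyGetD box 0 0), min m.2.1 (PySem.List.pyGetD box 1 0),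
         max m.2.2.1 (PySem.List.pyGetD box 2 0), max m.2.2.2 (PySem.List.pyGetD box 3 0))) := by
  funext m box
  simp only [min_def, max_def, Prod.mk.injEq]
  refine ⟨by split_ifs <;> omega, by split_ifs <;> omega, by split_ifs <;> omega, by split_ifs <;> omega⟩

theorem chunkBox_eq (cb : List (List Int)) : chunkBoxA cb = chunkBoxB cb := by
  cases cb with
  | nil => simp [chunkBoxA, chunkBoxB, PySem.List.min?, PySem.List.max?]
  | cons first rest =>
    simp only [chunkBoxA, chunkBoxB, List.map_cons,
      PySem.List.min?_id_cons, PySem.List.max?_id_cons, stepB_eq, tupleFold_eq]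

-- a fold appending one element to each component equals a pair of maps
theorem pairFold_eq {α β γ : Type} (l : List α) (f : α → β) (g : α → γ)
    (t : List β) (u : List γ) :
    l.foldl (fun (acc : List β × List γ) p => (acc.1 ++ [f p], acc.2 ++ [g p])) (t, u)
      = (t ++ l.map f, u ++ l.map g) := by
  induction l generalizing t u with
  | nil => simp
  | cons x xs ih => simp [ih]

-- ===== VERDICT (by name: the statement is the Claim_ definition above) =====
theorem compact_chunks_spec : Claim_equal_compact_chunks := by
  intro wtc wbc _ _
  show compact_chunks wtc wbc = compact_chunks_alt wtc wbc
  simp only [compact_chunks, compact_chunks_alt, pairFold_eq, List.nil_append, chunkBox_eq]
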